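-- pv_equiv track=rewrite | github.com/LinaC404/silly-guy-try-Leetcode | Daily attendance/1403. Minimum Subsequence in Non-Increasing Order.py | minSubsequence
-- ===== SOURCE A (Python) =====
-- def minSubsequence(nums):
--     """
--     :type nums: List[int]
--     :rtype: List[int]
--     Runtime: 43 ms, faster than 95.83% of Python online submissions for Minimum Subsequence in Non-Increasing Order.
--     Memory Usage: 13.6 MB, less than 25.00% of Python online submissions for Minimum Subsequence in Non-Increasing Order.
--     """
--     ans = []
--     all = sum(nums)
--     nums = sorted(nums,reverse=True)
--     temp = 0
--     for i in nums:
--         temp += i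
--         ans.append(i)
--         if temp<=all-temp:
--             pass
--         else:
--             break
--     return ans
-- ===== SOURCE B (Python) =====
-- def minSubsequence(nums):
--     # Selection-based: no sorting. Repeatedly extract the current maximum
--     # from the remaining pool until the taken sum strictly exceeds the rest.
--     total = sum(nums)
--     rest = list(nums)
--     taken = []
--     acc = 0
--     while rest:
--         m = max(rest)
--         rest.remove(m)
--         acc += m
--         taken.append(m)
--         if 2 * acc > total:
--             break
--     return taken
-- ===== Notes on version B (the rewrite author's own statement) =====
-- stated objective: alternative
-- what changed: Replaces A's sort-then-scan (sorted descending, accumulate, break) by sort-free repeated selection: extract the maximum of the remaining pool one element at a time until the taken sum exceeds the rest, trading O(n log n) for O(n^2) selection with no sort.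
import Mathlib
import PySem

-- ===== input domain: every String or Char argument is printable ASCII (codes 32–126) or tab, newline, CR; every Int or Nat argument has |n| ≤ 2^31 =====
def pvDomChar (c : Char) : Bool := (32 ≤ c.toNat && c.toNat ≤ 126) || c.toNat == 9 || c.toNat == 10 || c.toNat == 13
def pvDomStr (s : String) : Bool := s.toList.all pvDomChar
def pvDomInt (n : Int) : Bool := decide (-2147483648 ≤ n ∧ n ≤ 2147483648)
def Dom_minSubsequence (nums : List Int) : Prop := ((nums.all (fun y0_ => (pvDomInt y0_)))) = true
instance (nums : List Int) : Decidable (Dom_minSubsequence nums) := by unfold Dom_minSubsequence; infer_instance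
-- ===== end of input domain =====

-- B drops the sort entirely: it repeatedly extracts the maximum of the remaining pool
-- (selection) until the taken sum strictly exceeds the rest — an alternative algorithm.

-- ===== PORT A =====
-- A's for-loop with break: state is (temp, ans); break when temp > all - temp.
def pvLoopA (allv : Int) : List Int → Int → List Int → List Int
  | [], _, ans => ans
  | i :: rest, temp, ans =>
    if temp + i ≤ allv - (temp + i) then pvLoopA allv rest (temp + i) (ans ++ [i])
    else ans ++ [i]

def minSubsequence (nums : List Int) : List Int :=
  let allv := nums.sum
  let s := PySem.List.sorted nums (fun x => x) true
  pvLoopA allv s 0 []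

-- ===== PORT B =====
-- B's while-loop: pop max(rest), remove it, accumulate, break when 2*acc > total.
-- Fuel = initial length of the pool (each iteration removes one element).
-- The 'none' branches of max?/remove? are unreachable (rest nonempty, m ∈ rest).
def pvSelB (total : Int) : Nat → List Int → Int → List Int → List Int
  | _, [], _, taken => taken
  | 0, _ :: _, _, taken => taken
  | f + 1, x :: r, acc, taken =>
    match PySem.List.max? (x :: r) (fun y => y) with
    | none => taken
    | some m =>
      match PySem.List.remove? (x :: r) m with
      | none => taken
      | some rest' =>
        if 2 * (acc + m) > total then taken ++ [m]
        else pvSelB total f rest' (acc + m) (taken ++ [m])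

def minSubsequence_alt (nums : List Int) : List Int :=
  pvSelB nums.sum nums.length nums 0 []

-- ===== PRECONDITION & SPEC =====
def Spec_minSubsequence (nums : List Int) (out : List Int) : Prop := out = minSubsequence_alt nums
instance (nums : List Int) (out : List Int) : Decidable (Spec_minSubsequence nums out) := by unfold Spec_minSubsequence; infer_instance

-- ===== CLAIM (what is proved, stated in full; the proofs are below) =====
def Claim_equal_minSubsequence : Prop := ∀ (nums : List Int), Dom_minSubsequence nums → Spec_minSubsequence nums (minSubsequence nums)

-- ===== LEMMAS AND PROOFS =====

-- Extracting the max in front reconstructs sorted-descending: sortedDesc l = m :: sortedDesc (l.erase m).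
theorem sortedDesc_eq_max_cons (l : List Int) (m : Int)
    (hm : PySem.List.max? l (fun y => y) = some m) :
    PySem.List.sorted l (fun x => x) true = m :: PySem.List.sorted (l.erase m) (fun x => x) true := by
  have hmem : m ∈ l := PySem.List.max?_mem hm
  have hmax : ∀ y ∈ l, y ≤ m := by
    intro y hy; exact PySem.List.max?_isMax hm y hy
  have hperm : List.Perm (PySem.List.sorted l (fun x => x) true)
      (m :: PySem.List.sorted (l.erase m) (fun x => x) true) :=
    (PySem.List.sorted_perm l (fun x => x) true).trans
      ((List.perm_cons_erase hmem).trans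
        (List.Perm.cons m (PySem.List.sorted_perm (l.erase m) (fun x => x) true).symm))
  have h2 : List.Pairwise (fun a b : Int => b ≤ a)
      (m :: PySem.List.sorted (l.erase m) (fun x => x) true) := by
    refine List.Pairwise.cons ?_ (PySem.List.sorted_pairwise_rev (l.erase m) (fun x => x))
    intro y hy
    exact hmax y (l.erase_subset ((PySem.List.mem_sorted _ _ _ _).mp hy))
  exact List.Perm.eq_of_pairwise (le := fun a b : Int => b ≤ a)
    (fun a b _ _ h1 h2 => le_antisymm h2 h1)
    (PySem.List.sorted_pairwise_rev l (fun x => x)) h2 hperm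

theorem pvSelB_eq_loopA (T : Int) : ∀ (fuel : Nat) (rest : List Int), rest.length ≤ fuel →
    ∀ (acc : Int) (taken : List Int),
    pvSelB T fuel rest acc taken = pvLoopA T (PySem.List.sorted rest (fun x => x) true) acc taken := by
  intro fuel
  induction fuel with
  | zero =>
    intro rest hlen acc taken
    have : rest = [] := List.eq_nil_of_length_eq_zero (Nat.le_zero.mp hlen)
    subst this
    simp [pvSelB, pvLoopA, PySem.List.sorted]
  | succ f ih =>
    intro rest hlen acc taken
    cases rest with
    | nil => simp [pvSelB, pvLoopA, PySem.List.sorted]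
    | cons x r =>
      obtain ⟨m, hm⟩ : ∃ m, PySem.List.max? (x :: r) (fun y => y) = some m := by
        cases h : PySem.List.max? (x :: r) (fun y => y) with
        | none => exact absurd ((PySem.List.max?_eq_none_iff _ _).mp h) (by simp)
        | some m => exact ⟨m, rfl⟩
      have hmem : m ∈ x :: r := PySem.List.max?_mem hm
      have hrem : PySem.List.remove? (x :: r) m = some ((x :: r).erase m) :=
        PySem.List.remove?_eq_some_erase _ m hmem
      have hsorted := sortedDesc_eq_max_cons (x :: r) m hm
      have hlen' : ((x :: r).erase m).length ≤ f := by
        rw [List.length_erase_of_mem hmem]; simpa using Nat.le_of_succ_le_succ hlen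
      rw [hsorted]
      simp only [pvSelB, hm, hrem, pvLoopA]
      by_cases hb : acc + m ≤ T - (acc + m)
      · have hb2 : ¬ (2 * (acc + m) > T) := by omega
        rw [if_neg hb2, if_pos hb]
        exact ih _ hlen' (acc + m) (taken ++ [m])
      · have hb2 : 2 * (acc + m) > T := by omega
        rw [if_pos hb2, if_neg hb]

-- ===== VERDICT (by name: the statement is the Claim_ definition above) =====
theorem minSubsequence_spec : Claim_equal_minSubsequence := by
  intro nums _
  unfold Spec_minSubsequence minSubsequence minSubsequence_alt
  exact (pvSelB_eq_loopA nums.sum nums.length nums le_rfl 0 []).symm
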